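-- pv_equiv track=rewrite | github.com/jiho-symply/cloud_vmp_optimization | version2/viz_gantt.py | on_intervals
-- ===== SOURCE A (Python) =====
-- def on_intervals(u_series, times):
--     ints, on, s = [], False, None
--     for idx, t in enumerate(times):
--         v = int(u_series[idx])
--         if (not on) and v == 1:
--             on, s = True, t
--         elif on and v == 0:
--             ints.append((s, t))
--             on, s = False, None
--     if on:
--         ints.append((s, times[-1] + 1))
--     return ints
-- ===== SOURCE B (Python) =====
-- def _pair_up(toggles):
--     ints = []
--     while len(toggles) >= 2:
--         ints.append((toggles[0], toggles[1]))
--         toggles = toggles[2:]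
--     return ints
--
--
-- def on_intervals(u_series, times):
--     # Pass 1: collect the toggle times (moments the 0/1 level changes).
--     toggles = []
--     prev = 0
--     for v, t in zip(u_series, times):
--         if v in (0, 1) and v != prev:
--             toggles.append(t)
--             prev = v
--     # A trailing on-run closes at times[-1] + 1.
--     if prev == 1:
--         toggles.append(times[-1] + 1)
--     # Pass 2: pair consecutive toggle times into (start, end) intervals.
--     return _pair_up(toggles)
-- ===== Notes on version B (the rewrite author's own statement) =====
-- stated objective: alternative
-- what changed: B replaces A's interval-accumulating state machine (on-flag plus pending start, appending a pair at each off-edge) by a two-pass scheme: first collect the flat list of toggle times where the 0/1 level changes from the previous level, then pair consecutive toggle times into intervals by recursion.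
-- outside the precondition, e.g. on on_intervals([1], [5, 6]): A raises IndexError, B returns [(5, 7)]
import Mathlib
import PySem

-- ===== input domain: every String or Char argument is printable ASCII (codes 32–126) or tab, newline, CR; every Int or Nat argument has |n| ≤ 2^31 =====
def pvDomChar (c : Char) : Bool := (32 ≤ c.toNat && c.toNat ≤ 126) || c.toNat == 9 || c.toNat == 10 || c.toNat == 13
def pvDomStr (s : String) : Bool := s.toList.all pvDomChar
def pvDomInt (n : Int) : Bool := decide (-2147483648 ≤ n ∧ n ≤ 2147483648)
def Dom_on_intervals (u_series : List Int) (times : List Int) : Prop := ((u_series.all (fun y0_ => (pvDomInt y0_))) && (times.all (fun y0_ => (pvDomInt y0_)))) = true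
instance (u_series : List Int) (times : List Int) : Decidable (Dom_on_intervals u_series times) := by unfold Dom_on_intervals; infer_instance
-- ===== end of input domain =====

-- B replaces A's interval-accumulating state machine by a two-pass scheme (collect toggle
-- times, then pair consecutive toggles); alternative decomposition, same cost.

-- ===== PORT A =====
-- 'for idx, t in enumerate(times)'; state (ints, on, s); Python's s is None while off:
-- it is only read while on, so it is carried here as a plain Int (0 when off).
def onIntervalsGoA (u_series : List Int) : Nat → List Int → (List (Int × Int) × Bool × Int) → (List (Int × Int) × Bool × Int)
  | _, [], st => st
  | idx, t :: ts, (ints, on, s) =>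
      let v := (PySem.List.pyGet? u_series (idx : Int)).getD 0   -- none = IndexError, excluded by Pre_
      if !on && v == 1 then onIntervalsGoA u_series (idx+1) ts (ints, true, t)
      else if on && v == 0 then onIntervalsGoA u_series (idx+1) ts (ints ++ [(s, t)], false, 0)
      else onIntervalsGoA u_series (idx+1) ts (ints, on, s)

def on_intervals (u_series : List Int) (times : List Int) : List (Int × Int) :=
  let st := onIntervalsGoA u_series 0 times ([], false, 0)
  if st.2.1 then st.1 ++ [(st.2.2, (PySem.List.pyGet? times (-1)).getD 0 + 1)] else st.1

-- ===== PORT B =====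
-- _pair_up from Source B: consume the toggle list two at a time
def pairUp : List Int → List (Int × Int)
  | a :: b :: rest => (a, b) :: pairUp rest
  | _ => []

def on_intervals_alt (u_series : List Int) (times : List Int) : List (Int × Int) :=
  let st := (u_series.zip times).foldl
    (fun (st : List Int × Int) vt =>
      if (vt.1 = 0 ∨ vt.1 = 1) ∧ vt.1 ≠ st.2 then (st.1 ++ [vt.2], vt.1) else st)
    ([], 0)
  let toggles := if st.2 = 1 then st.1 ++ [(PySem.List.pyGet? times (-1)).getD 0 + 1] else st.1
  pairUp toggles

-- ===== PRECONDITION & SPEC =====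
-- A indexes u_series at every position of times, so it raises IndexError iff times is longer.
def Pre_on_intervals (u_series : List Int) (times : List Int) : Prop := times.length ≤ u_series.length
instance (u_series : List Int) (times : List Int) : Decidable (Pre_on_intervals u_series times) := by unfold Pre_on_intervals; infer_instance
def pvWitness_on_intervals : List Int × List Int := ([1, 0], [10, 20])

def Spec_on_intervals (u_series : List Int) (times : List Int) (out : List (Int × Int)) : Prop := out = on_intervals_alt u_series times
instance (u_series : List Int) (times : List Int) (out : List (Int × Int)) : Decidable (Spec_on_intervals u_series times out) := by unfold Spec_on_intervals; infer_instance

-- ===== CLAIM (what is proved, stated in full; the proofs are below) =====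
def Claim_equal_on_intervals : Prop := ∀ (u_series : List Int) (times : List Int), Dom_on_intervals u_series times → Pre_on_intervals u_series times → Spec_on_intervals u_series times (on_intervals u_series times)

-- ===== LEMMAS AND PROOFS =====

-- A's loop re-expressed over the zipped (value, time) pairs
def goZip : List (Int × Int) → (List (Int × Int) × Bool × Int) → (List (Int × Int) × Bool × Int)
  | [], st => st
  | (v, t) :: zs, (ints, on, s) =>
      if !on && v == 1 then goZip zs (ints, true, t)
      else if on && v == 0 then goZip zs (ints ++ [(s, t)], false, 0)
      else goZip zs (ints, on, s)

def flatPairs (L : List (Int × Int)) : List Int := L.flatMap (fun p => [p.1, p.2])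

lemma goA_eq_goZip (u : List Int) : ∀ (ts : List Int) (idx : Nat) st,
    ts.length ≤ (u.drop idx).length →
    onIntervalsGoA u idx ts st = goZip ((u.drop idx).zip ts) st := by
  intro ts
  induction ts with
  | nil => intro idx st _; cases u.drop idx <;> simp [onIntervalsGoA, goZip]
  | cons t ts ih =>
    intro idx st h
    obtain ⟨ints, on, s⟩ := st
    have hne : u.drop idx ≠ [] := by
      intro he; rw [he] at h; simp at h
    obtain ⟨r, rest, hr⟩ := List.exists_cons_of_ne_nil hne
    have hrest : rest = u.drop (idx + 1) := by
      have h2 := congrArg (List.drop 1) hr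
      simp only [List.drop_drop] at h2
      simpa [Nat.add_comm] using h2.symm
    have hget : PySem.List.pyGet? u (idx : Int) = some r := by
      rw [PySem.List.pyGet?_natCast]
      have : (u.drop idx).head? = some r := by rw [hr]; rfl
      rwa [List.head?_drop] at this
    have hlen : ts.length ≤ (u.drop (idx + 1)).length := by
      rw [hr] at h
      rw [← hrest]
      simpa using h
    simp only [onIntervalsGoA, hget, hr, List.zip_cons_cons, goZip, Option.getD_some]
    split
    · rw [ih (idx + 1) _ hlen, hrest]
    · split
      · rw [ih (idx + 1) _ hlen, hrest]
      · rw [ih (idx + 1) _ hlen, hrest]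

-- B's step function
def bStep (st : List Int × Int) (vt : Int × Int) : List Int × Int :=
  if (vt.1 = 0 ∨ vt.1 = 1) ∧ vt.1 ≠ st.2 then (st.1 ++ [vt.2], vt.1) else st

lemma inv_lemma : ∀ (zs : List (Int × Int)) (ints : List (Int × Int)) (on : Bool) (s : Int),
    zs.foldl bStep (flatPairs ints ++ (if on then [s] else []), if on then (1 : Int) else 0)
      = (flatPairs (goZip zs (ints, on, s)).1 ++ (if (goZip zs (ints, on, s)).2.1 then [(goZip zs (ints, on, s)).2.2] else []),
         if (goZip zs (ints, on, s)).2.1 then (1 : Int) else 0) := by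
  intro zs
  induction zs with
  | nil => intro ints on s; simp [goZip]
  | cons vt zs ih =>
    intro ints on s
    obtain ⟨v, t⟩ := vt
    simp only [List.foldl_cons]
    cases on with
    | false =>
      by_cases hv1 : v = 1
      · subst hv1
        have h1 : goZip ((1, t) :: zs) (ints, false, s) = goZip zs (ints, true, t) := by
          simp [goZip]
        have := ih ints true t
        simp only [if_pos] at this
        rw [h1]
        have hb : bStep (flatPairs ints ++ (if false then [s] else []), if false then (1:Int) else 0) (1, t)
            = (flatPairs ints ++ [t], 1) := by
          simp [bStep]
        rw [hb]
        simpa using this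
      · by_cases hv0 : v = 0
        · subst hv0
          have h1 : goZip ((0, t) :: zs) (ints, false, s) = goZip zs (ints, false, s) := by
            simp [goZip]
          have hb : bStep (flatPairs ints ++ (if false then [s] else []), if false then (1:Int) else 0) (0, t)
              = (flatPairs ints ++ (if false then [s] else []), if false then (1:Int) else 0) := by
            simp [bStep]
          rw [h1, hb]
          exact ih ints false s
        · have h1 : goZip ((v, t) :: zs) (ints, false, s) = goZip zs (ints, false, s) := by
            simp [goZip, hv1]
          have hb : bStep (flatPairs ints ++ (if false then [s] else []), if false then (1:Int) else 0) (v, t)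
              = (flatPairs ints ++ (if false then [s] else []), if false then (1:Int) else 0) := by
            simp [bStep, hv0, hv1]
          rw [h1, hb]
          exact ih ints false s
    | true =>
      by_cases hv0 : v = 0
      · subst hv0
        have h1 : goZip ((0, t) :: zs) (ints, true, s) = goZip zs (ints ++ [(s, t)], false, 0) := by
          simp [goZip]
        have hb : bStep (flatPairs ints ++ (if true then [s] else []), if true then (1:Int) else 0) (0, t)
            = (flatPairs (ints ++ [(s, t)]) ++ (if false then [(0:Int)] else []), if false then (1:Int) else 0) := by
          simp [bStep, flatPairs, List.flatMap_append]
        rw [h1, hb]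
        exact ih (ints ++ [(s, t)]) false 0
      · have h1 : goZip ((v, t) :: zs) (ints, true, s) = goZip zs (ints, true, s) := by
          by_cases hv1 : v = 1 <;> simp [goZip, hv0, hv1]
        have hb : bStep (flatPairs ints ++ (if true then [s] else []), if true then (1:Int) else 0) (v, t)
            = (flatPairs ints ++ (if true then [s] else []), if true then (1:Int) else 0) := by
          by_cases hv1 : v = 1 <;> simp [bStep, hv0, hv1]
        rw [h1, hb]
        exact ih ints true s

lemma pairUp_flatPairs : ∀ (L : List (Int × Int)), pairUp (flatPairs L) = L := by
  intro L
  induction L with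
  | nil => rfl
  | cons p L ih => simp [flatPairs, pairUp] at ih ⊢; exact ih

-- ===== VERDICT (by name: the statement is the Claim_ definition above) =====
theorem on_intervals_spec : Claim_equal_on_intervals := by
  intro u ts _ hpre
  unfold Spec_on_intervals on_intervals on_intervals_alt
  have hzip : onIntervalsGoA u 0 ts ([], false, 0) = goZip (u.zip ts) ([], false, 0) := by
    have := goA_eq_goZip u ts 0 ([], false, 0) (by simpa using hpre)
    simpa using this
  have hfold : (u.zip ts).foldl
      (fun (st : List Int × Int) vt =>
        if (vt.1 = 0 ∨ vt.1 = 1) ∧ vt.1 ≠ st.2 then (st.1 ++ [vt.2], vt.1) else st)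
      ([], 0) = (u.zip ts).foldl bStep ([], 0) := rfl
  have hinv := inv_lemma (u.zip ts) [] false 0
  simp only [flatPairs, List.flatMap_nil] at hinv
  rcases hA : goZip (u.zip ts) ([], false, 0) with ⟨ints, on, s⟩
  rw [hA] at hinv
  simp only [hzip, hA, hfold]
  simp only [if_neg (Bool.false_ne_true), List.append_nil] at hinv
  rw [hinv]
  cases on with
  | false =>
    simp only [Bool.false_eq_true, if_false, if_neg (by norm_num : ¬ (0 : Int) = 1)]
    simpa [flatPairs] using (pairUp_flatPairs ints).symm
  | true =>
    simp only [if_pos trivial]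
    simpa [flatPairs, List.flatMap_append] using
      (pairUp_flatPairs (ints ++ [(s, (PySem.List.pyGet? ts (-1)).getD 0 + 1)])).symm
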